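-- pv_equiv track=rewrite | github.com/stepsame/grokking-code | pramp/award_budget_cuts.py | solution
-- ===== SOURCE A (Python) =====
-- def solution(grants_array, new_budget):
--     # sort the grants array
--     grants_array.sort()
--
--     new_grants = []
--     left_budget = new_budget
--     left_grant_num = len(grants_array)
--     for i in range(len(grants_array)):
--         cap = grants_array[i]
--         if cap * left_grant_num >= left_budget:
--             cap = left_budget // left_grant_num
--             return cap
--         left_budget -= grants_array[i]
--         left_grant_num -= 1
--     return grants_array[-1]
-- ===== SOURCE B (Python) =====
-- def solution(grants_array, new_budget):
--     grants_array.sort()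
--     n = len(grants_array)
--     prefix = [0]
--     for g in grants_array:
--         prefix.append(prefix[-1] + g)
--     lo, hi = 0, n
--     while lo < hi:
--         mid = (lo + hi) // 2
--         if grants_array[mid] * (n - mid) >= new_budget - prefix[mid]:
--             hi = mid
--         else:
--             lo = mid + 1
--     if lo < n:
--         return (new_budget - prefix[lo]) // (n - lo)
--     return grants_array[-1]
-- ===== Notes on version B (the rewrite author's own statement) =====
-- stated objective: alternative
-- what changed: Replaces A's accumulating left-to-right scan (running remaining budget and grant count with early return) by a prefix-sum table over the sorted grants plus a binary search for the first index whose cap covers the remaining budget.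
import Mathlib
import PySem

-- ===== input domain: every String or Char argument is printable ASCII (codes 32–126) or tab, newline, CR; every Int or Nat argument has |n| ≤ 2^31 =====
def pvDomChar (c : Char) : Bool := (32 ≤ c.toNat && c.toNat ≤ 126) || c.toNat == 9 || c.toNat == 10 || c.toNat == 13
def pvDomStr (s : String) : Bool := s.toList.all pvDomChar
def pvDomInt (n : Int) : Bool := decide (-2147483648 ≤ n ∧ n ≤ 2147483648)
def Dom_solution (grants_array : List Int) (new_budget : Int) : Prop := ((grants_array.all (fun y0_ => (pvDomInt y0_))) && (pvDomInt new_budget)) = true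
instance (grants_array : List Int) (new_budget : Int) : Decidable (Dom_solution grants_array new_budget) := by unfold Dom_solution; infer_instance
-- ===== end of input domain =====

-- B replaces A's accumulating left-to-right scan with a prefix-sum table plus a binary
-- search for the first index where the cap covers the remaining budget (objective:
-- alternative decomposition; both A and B sort the argument in place in Python, and the
-- equivalence proved here is about the return value only).

-- ===== PORT A =====
-- the for-loop of A: state (left_budget, left_grant_num), early return = some
def solAux : List Int → Int → Int → Option Int
  | [], _, _ => none
  | c :: rest, lb, lg =>
    if c * lg ≥ lb then some (PySem.Int.floordiv lb lg)
    else solAux rest (lb - c) (lg - 1)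

def solution (grants_array : List Int) (new_budget : Int) : Int :=
  let s := PySem.List.sorted grants_array (fun x => x) false
  match solAux s new_budget (s.length : Int) with
  | some v => v
  | none => (PySem.List.pyGet? s (-1)).getD 0

-- ===== PORT B =====
-- prefix = [0]; for g in s: prefix.append(prefix[-1] + g)
def prefixes (s : List Int) : List Int :=
  s.foldl (fun acc g => acc ++ [acc.getLastD 0 + g]) [0]

-- while lo < hi: mid = (lo+hi)//2; if s[mid]*(n-mid) >= b - prefix[mid]: hi = mid else lo = mid+1
def bsearch (s : List Int) (b : Int) (pre : List Int) (lo hi : Nat) : Nat :=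
  if _h : lo < hi then
    if s.getD ((lo + hi) / 2) 0 * ((s.length : Int) - (((lo + hi) / 2 : Nat) : Int))
        ≥ b - pre.getD ((lo + hi) / 2) 0 then
      bsearch s b pre lo ((lo + hi) / 2)
    else
      bsearch s b pre ((lo + hi) / 2 + 1) hi
  else lo
termination_by hi - lo
decreasing_by all_goals omega

def solution_alt (grants_array : List Int) (new_budget : Int) : Int :=
  let s := PySem.List.sorted grants_array (fun x => x) false
  let n := s.length
  let pre := prefixes s
  let lo := bsearch s new_budget pre 0 n
  if lo < n then
    PySem.Int.floordiv (new_budget - pre.getD lo 0) ((n : Int) - (lo : Int))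
  else (PySem.List.pyGet? s (-1)).getD 0

-- ===== PRECONDITION & SPEC =====
-- Pre_ excludes only the empty list, on which A raises IndexError (grants_array[-1]).
def Pre_solution (grants_array : List Int) (new_budget : Int) : Prop := grants_array ≠ []
instance (grants_array : List Int) (new_budget : Int) : Decidable (Pre_solution grants_array new_budget) := by unfold Pre_solution; infer_instance
def pvWitness_solution : List Int × Int := ([2, 100, 50, 120, 1000], 190)

def Spec_solution (grants_array : List Int) (new_budget : Int) (out : Int) : Prop := out = solution_alt grants_array new_budget
instance (grants_array : List Int) (new_budget : Int) (out : Int) : Decidable (Spec_solution grants_array new_budget out) := by unfold Spec_solution; infer_instance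

-- ===== CLAIM (what is proved, stated in full; the proofs are below) =====
def Claim_equal_solution : Prop := ∀ (grants_array : List Int) (new_budget : Int), Dom_solution grants_array new_budget → Pre_solution grants_array new_budget → Spec_solution grants_array new_budget (solution grants_array new_budget)

-- ===== LEMMAS AND PROOFS =====

-- the running prefix sum of the first i elements
abbrev psum (s : List Int) (i : Nat) : Int := ((s.take i).sum)

-- the loop/search predicate: the i-th cap covers the remaining budget
abbrev capHits (s : List Int) (b : Int) (i : Nat) : Prop :=
  s.getD i 0 * ((s.length : Int) - (i : Int)) ≥ b - psum s i

lemma psum_succ (s : List Int) (k : Nat) (h : k < s.length) :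
    psum s (k + 1) = psum s k + s.getD k 0 := by
  rw [psum, psum, List.take_add_one, List.sum_append, List.getD_eq_getElem?_getD,
    List.getElem?_eq_getElem h]
  simp

lemma drop_cons' (s : List Int) (k : Nat) (h : k < s.length) :
    s.drop k = s.getD k 0 :: s.drop (k + 1) := by
  rw [List.getD_eq_getElem?_getD, List.getElem?_eq_getElem h]
  exact List.drop_eq_getElem_cons h

lemma prefixes_go (l : List Int) : ∀ (acc : List Int) (a : Int),
    l.foldl (fun acc g => acc ++ [acc.getLastD 0 + g]) (acc ++ [a])
      = (acc ++ [a]) ++ (List.range l.length).map (fun i => a + (l.take (i + 1)).sum) := by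
  induction l with
  | nil => simp
  | cons g rest ih =>
    intro acc a
    simp only [List.foldl_cons, List.getLastD_concat]
    rw [ih (acc ++ [a]) (a + g)]
    simp [List.range_succ_eq_map, List.map_map, Function.comp_def, add_assoc]

lemma prefixes_eq (s : List Int) :
    prefixes s = 0 :: (List.range s.length).map (fun i => (s.take (i + 1)).sum) := by
  have := prefixes_go s [] 0
  simpa [prefixes] using this

lemma prefixes_getD (s : List Int) (i : Nat) (h : i ≤ s.length) :
    (prefixes s).getD i 0 = psum s i := by
  rw [prefixes_eq]
  cases i with
  | zero => simp [psum]
  | succ j =>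
    have hj : j < s.length := by omega
    simp [List.getD_eq_getElem?_getD, List.getElem?_map,
      List.getElem?_range hj, psum]

lemma getD_mono (s : List Int) (hs : List.Pairwise (· ≤ ·) s) (i j : Nat)
    (hij : i ≤ j) (hj : j < s.length) : s.getD i 0 ≤ s.getD j 0 := by
  rcases eq_or_lt_of_le hij with rfl | hlt
  · exact le_refl _
  · have hi : i < s.length := lt_trans hlt hj
    rw [List.getD_eq_getElem?_getD, List.getElem?_eq_getElem hi,
      List.getD_eq_getElem?_getD, List.getElem?_eq_getElem hj]
    exact List.pairwise_iff_getElem.mp hs i j hi hj hlt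

lemma capHits_mono (s : List Int) (hs : List.Pairwise (· ≤ ·) s) (b : Int)
    (i j : Nat) (hij : i ≤ j) (hj : j < s.length) (hi : capHits s b i) : capHits s b j := by
  induction j, hij using Nat.le_induction with
  | base => exact hi
  | succ j hij ih =>
    have hjlen : j < s.length := by omega
    have hstep := ih hjlen
    have hps := psum_succ s j hjlen
    have hle : s.getD j 0 ≤ s.getD (j+1) 0 := getD_mono s hs j (j+1) (by omega) hj
    simp only [capHits, ge_iff_le] at hstep ⊢
    rw [hps]
    push_cast
    nlinarith [hstep, hle, (by omega : (0:Int) ≤ (s.length:Int) - (j:Int) - 1)]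

lemma solAux_none (s : List Int) (b : Int) (m : Nat) : ∀ k, k + m = s.length →
    (∀ i, k ≤ i → i < s.length → ¬ capHits s b i) →
    solAux (s.drop k) (b - psum s k) ((s.length : Int) - (k : Int)) = none := by
  induction m with
  | zero =>
    intro k hk _
    rw [List.drop_eq_nil_of_le (by omega)]
    rfl
  | succ m ih =>
    intro k hk hno
    have hklen : k < s.length := by omega
    rw [drop_cons' s k hklen, solAux]
    have hnk := hno k (le_refl _) hklen
    simp only [capHits, ge_iff_le, not_le] at hnk
    rw [if_neg (by omega)]
    have : b - psum s k - s.getD k 0 = b - psum s (k + 1) := by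
      rw [psum_succ s k hklen]; ring
    rw [this, show (s.length : Int) - (k : Int) - 1 = (s.length : Int) - ((k+1 : Nat) : Int) by push_cast; ring]
    exact ih (k+1) (by omega) (fun i hi hilen => hno i (by omega) hilen)

lemma solAux_some (s : List Int) (b : Int) (m : Nat) : ∀ k j, k + m = s.length →
    k ≤ j → j < s.length → capHits s b j → (∀ i, k ≤ i → i < j → ¬ capHits s b i) →
    solAux (s.drop k) (b - psum s k) ((s.length : Int) - (k : Int))
      = some (PySem.Int.floordiv (b - psum s j) ((s.length : Int) - (j : Int))) := by
  induction m with
  | zero => intro k j hk hkj hj _ _; omega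
  | succ m ih =>
    intro k j hk hkj hj hhit hmin
    have hklen : k < s.length := by omega
    rw [drop_cons' s k hklen, solAux]
    by_cases hck : capHits s b k
    · have hjk : j = k := by
        by_contra hne
        exact hmin k (le_refl _) (by omega) hck
      subst hjk
      simp only [capHits, ge_iff_le] at hck
      rw [if_pos (by omega)]
    · have hkj' : k + 1 ≤ j := by
        rcases eq_or_lt_of_le hkj with rfl | h
        · exact absurd hhit hck
        · omega
      simp only [capHits, ge_iff_le, not_le] at hck
      rw [if_neg (by omega)]
      have h1 : b - psum s k - s.getD k 0 = b - psum s (k + 1) := by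
        rw [psum_succ s k hklen]; ring
      rw [h1, show (s.length : Int) - (k : Int) - 1 = (s.length : Int) - ((k+1 : Nat) : Int) by push_cast; ring]
      exact ih (k+1) j (by omega) hkj' hj hhit (fun i hi hij => hmin i (by omega) hij)

lemma bsearch_spec (s : List Int) (hs : List.Pairwise (· ≤ ·) s) (b : Int) (pre : List Int)
    (hpre : ∀ i, i < s.length → pre.getD i 0 = psum s i)
    (m : Nat) : ∀ lo hi, hi - lo = m → lo ≤ hi → hi ≤ s.length →
    (∀ i, i < lo → ¬ capHits s b i) → (∀ i, hi ≤ i → i < s.length → capHits s b i) →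
    lo ≤ bsearch s b pre lo hi ∧ bsearch s b pre lo hi ≤ hi ∧
      (∀ i, i < bsearch s b pre lo hi → ¬ capHits s b i) ∧
      (bsearch s b pre lo hi < s.length → capHits s b (bsearch s b pre lo hi)) := by
  induction m using Nat.strong_induction_on with
  | _ m ih =>
    intro lo hi hm hlh hhi hlow hhigh
    by_cases h : lo < hi
    · rw [bsearch, dif_pos h]
      set mid := (lo + hi) / 2 with hmid
      have hmlt : mid < hi := by omega
      have hmge : lo ≤ mid := by omega
      have hmlen : mid < s.length := by omega
      rw [hpre mid hmlen]
      by_cases hc : capHits s b mid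
      · rw [if_pos (by simpa [capHits] using hc)]
        obtain ⟨h1, h2, h3, h4⟩ := ih (mid - lo) (by omega) lo mid rfl (by omega) (by omega) hlow
          (fun i hi' hilen => capHits_mono s hs b mid i hi' hilen hc)
        exact ⟨h1, by omega, h3, h4⟩
      · rw [if_neg (by simpa [capHits] using hc)]
        have hlow' : ∀ i, i < mid + 1 → ¬ capHits s b i := by
          intro i hi' hcap
          rcases Nat.lt_or_ge i lo with h' | h'
          · exact hlow i h' hcap
          · exact hc (capHits_mono s hs b i mid (by omega) hmlen hcap)
        obtain ⟨h1, h2, h3, h4⟩ := ih (hi - (mid + 1)) (by omega) (mid + 1) hi rfl (by omega) hhi hlow' hhigh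
        exact ⟨by omega, h2, h3, h4⟩
    · rw [bsearch, dif_neg h]
      have : lo = hi := by omega
      exact ⟨le_refl _, by omega, hlow, fun hlt => hhigh lo (by omega) hlt⟩

-- ===== VERDICT (by name: the statement is the Claim_ definition above) =====
theorem solution_spec : Claim_equal_solution := by
  intro g b _hdom _hpre
  unfold Spec_solution solution solution_alt
  show (match solAux (PySem.List.sorted g (fun x => x) false) b
          ((PySem.List.sorted g (fun x => x) false).length : Int) with
        | some v => v
        | none => (PySem.List.pyGet? (PySem.List.sorted g (fun x => x) false) (-1)).getD 0)
      = (if bsearch (PySem.List.sorted g (fun x => x) false) b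
            (prefixes (PySem.List.sorted g (fun x => x) false)) 0
            (PySem.List.sorted g (fun x => x) false).length
            < (PySem.List.sorted g (fun x => x) false).length then
          PySem.Int.floordiv
            (b - (prefixes (PySem.List.sorted g (fun x => x) false)).getD
              (bsearch (PySem.List.sorted g (fun x => x) false) b
                (prefixes (PySem.List.sorted g (fun x => x) false)) 0
                (PySem.List.sorted g (fun x => x) false).length) 0)
            (((PySem.List.sorted g (fun x => x) false).length : Int)
              - ((bsearch (PySem.List.sorted g (fun x => x) false) b
                  (prefixes (PySem.List.sorted g (fun x => x) false)) 0
                  (PySem.List.sorted g (fun x => x) false).length : Nat) : Int))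
        else (PySem.List.pyGet? (PySem.List.sorted g (fun x => x) false) (-1)).getD 0)
  set s := PySem.List.sorted g (fun x => x) false with hsdef
  have hs : List.Pairwise (· ≤ ·) s := by
    simpa using PySem.List.sorted_pairwise (xs := g) (key := fun x => x)
  have hpre : ∀ i, i < s.length → (prefixes s).getD i 0 = psum s i :=
    fun i hi => prefixes_getD s i (le_of_lt hi)
  have hbs := bsearch_spec s hs b (prefixes s) hpre s.length 0 s.length rfl
    (Nat.zero_le _) (le_refl _) (by omega) (by omega)
  set r := bsearch s b (prefixes s) 0 s.length with hrdef
  obtain ⟨_, hrle, hrlow, hrhit⟩ := hbs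
  by_cases hex : ∃ i, i < s.length ∧ capHits s b i
  · set j := Nat.find hex with hjdef
    obtain ⟨hjn, hjcap⟩ := Nat.find_spec hex
    have hjmin : ∀ i, 0 ≤ i → i < j → ¬ capHits s b i := by
      intro i _ hij hcap
      exact Nat.find_min hex hij ⟨by omega, hcap⟩
    have hA := solAux_some s b s.length 0 j (by omega) (Nat.zero_le _) hjn hjcap hjmin
    simp only [List.drop_zero, Nat.cast_zero, sub_zero] at hA
    have hrj : r = j := by
      have h1 : r ≤ j := by
        by_contra hlt
        exact hrlow j (by omega) hjcap
      have h2 : j ≤ r := by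
        rcases Nat.lt_or_ge r s.length with hr | hr
        · by_contra hlt
          exact Nat.find_min hex (by omega) ⟨hr, hrhit hr⟩
        · omega
      omega
    rw [show psum s 0 = 0 from rfl, sub_zero] at hA
    rw [hrj, if_pos hjn, hpre j hjn]
    simp only [hA]
  · push Not at hex
    have hno : ∀ i, 0 ≤ i → i < s.length → ¬ capHits s b i := by
      intro i _ h hcap
      simp only [capHits, ge_iff_le] at hcap ⊢
      exact absurd (hex i h) (by omega)
    have hA := solAux_none s b s.length 0 (by omega) hno
    simp only [List.drop_zero, Nat.cast_zero, sub_zero] at hA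
    rw [show psum s 0 = 0 from rfl, sub_zero] at hA
    have hrn : r = s.length := by
      rcases Nat.lt_or_ge r s.length with hr | hr
      · have h1 := hrhit hr
        have h2 := hex r hr
        simp only [capHits, ge_iff_le] at h1
        omega
      · omega
    rw [hrn, if_neg (by omega)]
    simp only [hA]
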